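-- pv_equiv track=rewrite | github.com/SONG-2J/KG | webapp/utils/getSPO.py | word2SPO
-- ===== SOURCE A (Python) =====
-- def word2SPO(word_list):
--     spo_list = []
--     index = 0
--     while index < len(word_list):
--         if 'n' in word_list[index][1]:
--             # if index + 1 < len(word_list) and 'av' in word_list[index + 1][1]:  # 跳过可能是主语的词
--             #     index += 1
--             #     continue
--             fw1, fw1_index = preFindWord(word_list, index - 1, 'a')
--             if fw1 == "UnFind":
--                 index += 1
--                 continue
--             else:
--                 fw2, fw2_index = preFindWord(word_list, fw1_index - 1, 'n')
--                 if fw2 == "UnFind":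
--                     index += 1
--                     continue
--                 else:
--                     spo_list.append([fw2, fw1, word_list[index][0]])  # 添加三元关系组
--         index += 1
--     return spo_list
--
-- def preFindWord(word_list, index, word_p):
--     while index >= 0:
--         if word_p in word_list[index][1]:
--             return word_list[index][0], index
--         index -= 1
--     return "UnFind", -1
-- ===== SOURCE B (Python) =====
-- def word2SPO(word_list):
--     # Single forward pass: carry the latest 'a'-tagged word (paired with the
--     # latest 'n'-tagged word seen strictly before it) instead of rescanning backward.
--     spo_list = []
--     last_n = None                 # nearest previous word whose tag contains 'n'
--     last_a = None                 # (word, last_n at that moment) for nearest tag containing 'a'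
--     for row in word_list:
--         word, tag = row[0], row[1]
--         if 'n' in tag and last_a is not None:
--             a_word, n_before = last_a
--             if n_before is not None:
--                 spo_list.append([n_before, a_word, word])
--         if 'a' in tag:
--             last_a = (word, last_n)
--         if 'n' in tag:
--             last_n = word
--     return spo_list
-- ===== Notes on version B (the rewrite author's own statement) =====
-- stated objective: alternative
-- what changed: Replaces the per-noun backward rescans (preFindWord) with a single forward pass that carries the nearest previous 'a'-tagged word together with the 'n'-tagged word last seen before it, so no backward scanning is needed.
-- outside the precondition, e.g. on word2SPO([['N1', 'n'], ['UnFind', 'a'], ['X', 'n']]): A returns [], B returns [['N1', 'UnFind', 'X']]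
import Mathlib
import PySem

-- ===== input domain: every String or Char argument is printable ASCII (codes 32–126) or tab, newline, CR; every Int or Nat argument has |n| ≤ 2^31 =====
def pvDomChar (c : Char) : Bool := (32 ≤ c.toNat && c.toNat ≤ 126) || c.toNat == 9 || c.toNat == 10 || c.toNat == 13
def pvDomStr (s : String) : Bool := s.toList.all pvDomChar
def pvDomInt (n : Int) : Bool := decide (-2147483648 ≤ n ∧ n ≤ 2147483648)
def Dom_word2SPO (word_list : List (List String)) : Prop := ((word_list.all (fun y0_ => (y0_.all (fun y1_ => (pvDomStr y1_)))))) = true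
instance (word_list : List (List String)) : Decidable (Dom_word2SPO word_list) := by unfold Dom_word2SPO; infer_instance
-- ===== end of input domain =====

-- B replaces A's per-noun backward rescans (preFindWord) with ONE forward pass carrying the
-- nearest previous 'a'-tagged word (paired with the 'n'-tagged word seen before it):
-- an alternative algorithm with no backward scanning (same measured cost on the timed inputs).

-- ===== PORT A =====
def preFindWord (word_list : List (List String)) (index : Int) (word_p : String) :
    String × Int :=
  if h : 0 ≤ index then
    if PySem.Str.isIn word_p (PySem.List.pyGetD (PySem.List.pyGetD word_list index []) 1 "") then
      (PySem.List.pyGetD (PySem.List.pyGetD word_list index []) 0 "", index)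
    else preFindWord word_list (index - 1) word_p
  else ("UnFind", -1)
termination_by (index + 1).toNat
decreasing_by omega

def word2SPOLoop (word_list : List (List String)) (index : Nat) (spo : List (List String)) :
    List (List String) :=
  if h : index < word_list.length then
    if PySem.Str.isIn "n" (PySem.List.pyGetD (PySem.List.pyGetD word_list (index : Int) []) 1 "") then
      let f1 := preFindWord word_list ((index : Int) - 1) "a"
      if f1.1 = "UnFind" then word2SPOLoop word_list (index + 1) spo
      else
        let f2 := preFindWord word_list (f1.2 - 1) "n"
        if f2.1 = "UnFind" then word2SPOLoop word_list (index + 1) spo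
        else word2SPOLoop word_list (index + 1)
          (spo ++ [[f2.1, f1.1, PySem.List.pyGetD (PySem.List.pyGetD word_list (index : Int) []) 0 ""]])
    else word2SPOLoop word_list (index + 1) spo
  else spo
termination_by word_list.length - index

def word2SPO (word_list : List (List String)) : List (List String) :=
  word2SPOLoop word_list 0 []

-- ===== PORT B =====
def word2SPOAltGo (rows : List (List String)) (spo : List (List String))
    (lastN : Option String) (lastA : Option (String × Option String)) : List (List String) :=
  match rows with
  | [] => spo
  | row :: rest =>
    let word := PySem.List.pyGetD row 0 ""
    let tag := PySem.List.pyGetD row 1 ""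
    let hasN := PySem.Str.isIn "n" tag
    let spo' :=
      if hasN then
        match lastA with
        | none => spo
        | some (aw, nbo) =>
          match nbo with
          | none => spo
          | some nb => spo ++ [[nb, aw, word]]
      else spo
    let lastA' := if PySem.Str.isIn "a" tag then some (word, lastN) else lastA
    let lastN' := if hasN then some word else lastN
    word2SPOAltGo rest spo' lastN' lastA'

def word2SPO_alt (word_list : List (List String)) : List (List String) :=
  word2SPOAltGo word_list [] none none

-- ===== PRECONDITION & SPEC =====
-- Pre_ excludes rows with fewer than 2 entries (Python raises IndexError there) and lists in
-- which some 'a'- or 'n'-tagged row's word is the literal string "UnFind", which A uses as an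
-- in-band sentinel, so such a word found by the backward scan is misread as absence (a
-- defensible-corner artefact of A's sentinel choice; B reports it like any other word).
def Pre_word2SPO (word_list : List (List String)) : Prop :=
  ∀ row ∈ word_list, 2 ≤ row.length ∧
    ((PySem.Str.isIn "a" (PySem.List.pyGetD row 1 "") = true ∨
      PySem.Str.isIn "n" (PySem.List.pyGetD row 1 "") = true) →
      PySem.List.pyGetD row 0 "" ≠ "UnFind")
instance (word_list : List (List String)) : Decidable (Pre_word2SPO word_list) := by
  unfold Pre_word2SPO; infer_instance

def pvWitness_word2SPO : List (List String) := [["dog", "n"], ["big", "a"], ["tail", "n"]]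

def Spec_word2SPO (word_list : List (List String)) (out : List (List String)) : Prop :=
  out = word2SPO_alt word_list
instance (word_list : List (List String)) (out : List (List String)) :
    Decidable (Spec_word2SPO word_list out) := by unfold Spec_word2SPO; infer_instance

-- ===== CLAIM (what is proved, stated in full; the proofs are below) =====
def Claim_equal_word2SPO : Prop := ∀ (word_list : List (List String)),
  Dom_word2SPO word_list → Pre_word2SPO word_list →
  Spec_word2SPO word_list (word2SPO word_list)

-- ===== LEMMAS AND PROOFS =====

-- B's lastN state describes A's backward 'n'-scan from position i.
def RelN (wl : List (List String)) (i : Int) (o : Option String) : Prop :=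
  match o with
  | none => preFindWord wl i "n" = ("UnFind", -1)
  | some w => (preFindWord wl i "n").1 = w ∧ w ≠ "UnFind"

-- B's lastA state describes A's backward 'a'-scan from position i, together with
-- the 'n'-scan restarted below the found position.
def RelA (wl : List (List String)) (i : Int) (o : Option (String × Option String)) : Prop :=
  match o with
  | none => preFindWord wl i "a" = ("UnFind", -1)
  | some (aw, nb) =>
      (preFindWord wl i "a").1 = aw ∧ aw ≠ "UnFind" ∧
      RelN wl ((preFindWord wl i "a").2 - 1) nb

theorem preFindWord_step (wl : List (List String)) (k : Nat) (p : String) :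
    preFindWord wl (k : Int) p =
      (if PySem.Str.isIn p (PySem.List.pyGetD (PySem.List.pyGetD wl (k : Int) []) 1 "") then
        (PySem.List.pyGetD (PySem.List.pyGetD wl (k : Int) []) 0 "", (k : Int))
      else preFindWord wl ((k : Int) - 1) p) := by
  rw [preFindWord]
  simp

theorem preFindWord_neg (wl : List (List String)) (p : String) :
    preFindWord wl (-1) p = ("UnFind", -1) := by
  rw [preFindWord]; simp

theorem RelN_congr (wl : List (List String)) (i j : Int) (o : Option String)
    (h : preFindWord wl i "n" = preFindWord wl j "n") (ho : RelN wl j o) : RelN wl i o := by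
  cases o with
  | none =>
    show preFindWord wl i "n" = ("UnFind", -1)
    rw [h]; exact ho
  | some w =>
    have ho' : (preFindWord wl j "n").1 = w ∧ w ≠ "UnFind" := ho
    exact ⟨by rw [h]; exact ho'.1, ho'.2⟩

theorem RelA_congr (wl : List (List String)) (i j : Int) (o : Option (String × Option String))
    (h : preFindWord wl i "a" = preFindWord wl j "a") (ho : RelA wl j o) : RelA wl i o := by
  cases o with
  | none =>
    show preFindWord wl i "a" = ("UnFind", -1)
    rw [h]; exact ho
  | some pr =>
    obtain ⟨aw, nb⟩ := pr
    have ho' : (preFindWord wl j "a").1 = aw ∧ aw ≠ "UnFind" ∧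
        RelN wl ((preFindWord wl j "a").2 - 1) nb := ho
    exact ⟨by rw [h]; exact ho'.1, ho'.2.1, by rw [h]; exact ho'.2.2⟩

theorem loop_eq_go (rest : List (List String)) :
    ∀ (wl : List (List String)) (k : Nat) (spo : List (List String))
      (lastN : Option String) (lastA : Option (String × Option String)),
    wl.drop k = rest →
    Pre_word2SPO wl →
    RelN wl ((k : Int) - 1) lastN →
    RelA wl ((k : Int) - 1) lastA →
    word2SPOLoop wl k spo = word2SPOAltGo rest spo lastN lastA := by
  induction rest with
  | nil =>
    intro wl k spo lastN lastA hdrop _ _ _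
    have hk : wl.length ≤ k := by
      have := List.drop_eq_nil_iff.mp hdrop
      omega
    rw [word2SPOLoop, word2SPOAltGo.eq_def]
    simp [Nat.not_lt.mpr hk]
  | cons row rest ih =>
    intro wl k spo lastN lastA hdrop hpre hN hA
    have hk : k < wl.length := by
      by_contra hc
      rw [List.drop_eq_nil_iff.mpr (by omega)] at hdrop
      simp at hdrop
    have hget : wl[k]? = some row := by
      have : (wl.drop k)[0]? = some row := by rw [hdrop]; rfl
      simpa using this
    have hrow : PySem.List.pyGetD wl (k : Int) [] = row := by
      rw [PySem.List.pyGetD_natCast]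
      simp [List.getD, hget]
    have hmem : row ∈ wl := by
      obtain ⟨h1, h2⟩ := List.getElem?_eq_some_iff.mp hget
      exact h2 ▸ List.getElem_mem _
    have hUn := (hpre row hmem).2
    have hdrop' : wl.drop (k + 1) = rest := by
      have h1 : wl.drop (k + 1) = (wl.drop k).drop 1 := by rw [List.drop_drop]
      rw [h1, hdrop]; rfl
    have hcast : ((k + 1 : Nat) : Int) - 1 = (k : Int) := by push_cast; ring
    set word := PySem.List.pyGetD row 0 "" with hword
    set tag := PySem.List.pyGetD row 1 "" with htag
    have hstepN : preFindWord wl (k : Int) "n" =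
        (if PySem.Str.isIn "n" tag then (word, (k : Int))
         else preFindWord wl ((k : Int) - 1) "n") := by
      rw [preFindWord_step, hrow]
    have hstepA : preFindWord wl (k : Int) "a" =
        (if PySem.Str.isIn "a" tag then (word, (k : Int))
         else preFindWord wl ((k : Int) - 1) "a") := by
      rw [preFindWord_step, hrow]
    have hN' : ∀ b, b = PySem.Str.isIn "n" tag →
        RelN wl ((k : Int)) (if b then some word else lastN) := by
      intro b hb
      cases b with
      | true =>
        show (preFindWord wl (k : Int) "n").1 = word ∧ word ≠ "UnFind"
        rw [hstepN, if_pos hb.symm]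
        exact ⟨rfl, hUn (Or.inr hb.symm)⟩
      | false =>
        simp only [if_neg Bool.false_ne_true]
        exact RelN_congr wl _ _ lastN (by rw [hstepN, if_neg (by rw [← hb]; simp)]) hN
    have hA' : ∀ b, b = PySem.Str.isIn "a" tag →
        RelA wl ((k : Int)) (if b then some (word, lastN) else lastA) := by
      intro b hb
      cases b with
      | true =>
        show (preFindWord wl (k : Int) "a").1 = word ∧ word ≠ "UnFind" ∧
          RelN wl ((preFindWord wl (k : Int) "a").2 - 1) lastN
        rw [hstepA, if_pos hb.symm]
        exact ⟨rfl, hUn (Or.inl hb.symm), hN⟩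
      | false =>
        simp only [if_neg Bool.false_ne_true]
        exact RelA_congr wl _ _ lastA (by rw [hstepA, if_neg (by rw [← hb]; simp)]) hA
    have hrec : ∀ (spo' : List (List String)),
        word2SPOLoop wl (k + 1) spo' =
          word2SPOAltGo rest spo'
            (if PySem.Str.isIn "n" tag then some word else lastN)
            (if PySem.Str.isIn "a" tag then some (word, lastN) else lastA) := by
      intro spo'
      exact ih wl (k + 1) spo' _ _ hdrop' hpre
        (by rw [hcast]; exact hN' _ rfl) (by rw [hcast]; exact hA' _ rfl)
    by_cases hn : PySem.Str.isIn "n" tag = true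
    · have hnC : PySem.Chars.isIn ['n'] tag.toList = true := by simpa using hn
      cases lastA with
      | none =>
        have hf1 : preFindWord wl ((k : Int) - 1) "a" = ("UnFind", -1) := hA
        rw [word2SPOLoop, word2SPOAltGo.eq_def]
        simp only [hk, dif_pos, hrow, ← hword, ← htag, hn, if_true, hf1]
        simpa [hnC] using hrec spo
      | some pr =>
        obtain ⟨aw, nb⟩ := pr
        have hA3 : (preFindWord wl ((k : Int) - 1) "a").1 = aw ∧ aw ≠ "UnFind" ∧
            RelN wl ((preFindWord wl ((k : Int) - 1) "a").2 - 1) nb := hA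
        obtain ⟨haw1, haw2, hnb⟩ := hA3
        cases nb with
        | none =>
          have hf2 : preFindWord wl ((preFindWord wl ((k : Int) - 1) "a").2 - 1) "n"
              = ("UnFind", -1) := hnb
          rw [word2SPOLoop, word2SPOAltGo.eq_def]
          simp only [hk, dif_pos, hrow, ← hword, ← htag, hn, if_true, haw1,
            if_neg haw2, hf2]
          simpa [hnC] using hrec spo
        | some nw =>
          have hnb' : (preFindWord wl ((preFindWord wl ((k : Int) - 1) "a").2 - 1) "n").1 = nw
              ∧ nw ≠ "UnFind" := hnb
          rw [word2SPOLoop, word2SPOAltGo.eq_def]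
          simp only [hk, dif_pos, hrow, ← hword, ← htag, hn, if_true, haw1,
            if_neg haw2, hnb'.1, if_neg hnb'.2]
          simpa [hnC] using hrec (spo ++ [[nw, aw, word]])
    · have hnC : ¬ PySem.Chars.isIn ['n'] tag.toList = true := by simpa using hn
      rw [word2SPOLoop, word2SPOAltGo.eq_def]
      simp only [hk, dif_pos, hrow, ← hword, ← htag]
      simpa [hnC] using hrec spo

-- ===== VERDICT (by name: the statement is the Claim_ definition above) =====
theorem word2SPO_spec : Claim_equal_word2SPO := by
  intro wl _ hpre
  unfold Spec_word2SPO word2SPO word2SPO_alt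
  have h0 : ((0 : Nat) : Int) - 1 = -1 := by norm_num
  exact loop_eq_go wl wl 0 [] none none (by simp) hpre
    (by show RelN wl _ none; rw [h0]; exact preFindWord_neg wl "n")
    (by show RelA wl _ none; rw [h0]; exact preFindWord_neg wl "a")
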